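-- pv_equiv track=rewrite | github.com/CBoser/salesteamone | tools/auto_import_bat.py | parse_richmond_pack_name
-- ===== SOURCE A (Python) =====
-- from typing import List, Dict, Tuple, Optional
--
-- def parse_richmond_pack_name(pack_name: str) -> Dict:
--     """Parse Richmond pack name into components
--
--     Args:
--         pack_name: Pack name like "|10.82BCD OPT DEN FOUNDATION"
--
--     Returns:
--         Dict with phase_major, phase_minor, elevations, description
--     """
--     # Remove leading pipe and spaces
--     pack_clean = pack_name.strip().lstrip('|')
--
--     # Split on first space to separate code from description
--     parts = pack_clean.split(' ', 1)
--     code_part = parts[0] if parts else ""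
--     description = parts[1] if len(parts) > 1 else ""
--
--     # Split on period (if present)
--     if '.' in code_part:
--         major_part, minor_part = code_part.split('.', 1)
--         # Handle edge case: "|.34" (period before number)
--         if not major_part:
--             # Use first digits from minor part as major
--             minor_digits = ''.join(filter(str.isdigit, minor_part))
--             if minor_digits:
--                 major_part = minor_digits[:2] if len(minor_digits) >= 2 else minor_digits
--                 minor_part = minor_digits[2:] if len(minor_digits) > 2 else ""
--     else:
--         # No period - simpler format like "|10" or "|11"
--         major_part = code_part
--         minor_part = ""
--
--     # Extract phase major (digits only)
--     phase_major = ''.join(filter(str.isdigit, major_part))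
--
--     # Extract phase minor and elevations from minor part
--     phase_minor = ""
--     elevations = ""
--
--     if minor_part:
--         for char in minor_part:
--             if char.isdigit() or char in ['x', 'X']:
--                 phase_minor += char
--             elif char.isalpha() and char.upper() in 'ABCDEFGHIJKLMNOPQRSTUVWXYZ':
--                 # Elevation letters (could be ABCD elevations or suffixes like 'f', 's')
--                 elevations += char.upper()
--             # Skip other characters
--
--     return {
--         'phase_major': phase_major,
--         'phase_minor': phase_minor,
--         'elevations': elevations,
--         'description': description,
--         'error': None
--     }
-- ===== SOURCE B (Python) =====
-- def parse_richmond_pack_name(pack_name: str):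
--     """Parse Richmond pack name in a single character-driven pass.
--
--     A small state machine scans the cleaned string once (state 0 = major code,
--     state 1 = minor code, state 2 = description); the '.NN' leading-period
--     edge case is fixed up afterwards from the digits already collected.
--     """
--     s = pack_name.strip().lstrip('|')
--     state = 0
--     major = minor = elev = desc = ""
--     for ch in s:
--         if state == 2:
--             desc += ch
--         elif ch == ' ':
--             state = 2
--         elif state == 0:
--             if ch == '.':
--                 state = 1
--             elif ch.isdigit():
--                 major += ch
--         else:
--             if ch.isdigit() or ch == 'x' or ch == 'X':
--                 minor += ch
--             elif ch.isalpha():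
--                 elev += ch.upper()
--     if s.startswith('.'):
--         d = ''.join(c for c in minor if c.isdigit())
--         if d:
--             major, minor, elev = d[:2], d[2:], ""
--     return {
--         'phase_major': major,
--         'phase_minor': minor,
--         'elevations': elev,
--         'description': desc,
--         'error': None
--     }
-- ===== Notes on version B (the rewrite author's own statement) =====
-- stated objective: alternative
-- what changed: Replaced A's multi-pass pipeline (split on space, substring test, split on period, digit-filter passes and a classification loop) by a single character-driven state-machine pass over the cleaned string (states: major code / minor code / description) with one small fixup for the leading-period case.
import Mathlib
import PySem

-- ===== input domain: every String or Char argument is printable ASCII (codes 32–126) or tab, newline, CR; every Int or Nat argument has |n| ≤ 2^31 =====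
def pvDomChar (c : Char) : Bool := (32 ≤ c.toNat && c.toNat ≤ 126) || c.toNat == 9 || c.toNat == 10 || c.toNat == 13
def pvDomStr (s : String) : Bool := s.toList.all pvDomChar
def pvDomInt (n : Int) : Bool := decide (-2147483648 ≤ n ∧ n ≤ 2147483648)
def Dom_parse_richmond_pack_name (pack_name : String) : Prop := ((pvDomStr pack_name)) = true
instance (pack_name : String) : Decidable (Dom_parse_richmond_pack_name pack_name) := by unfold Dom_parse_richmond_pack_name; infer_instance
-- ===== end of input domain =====

-- B replaces A's strip/split/filter pipeline by a single character-driven state-machine pass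
-- (alternative decomposition, same cost); return value only, neither version mutates its argument.

-- ===== PORT A =====
-- 'ABCDEFGHIJKLMNOPQRSTUVWXYZ' of A's membership test
def pvAZ : List Char := "ABCDEFGHIJKLMNOPQRSTUVWXYZ".toList

-- ''.join(filter(str.isdigit, s))
def pvDigits (cs : List Char) : List Char := cs.filter (fun c => PySem.Chars.isdigit c)

-- the body of A's 'for char in minor_part' loop, state = (phase_minor, elevations)
def pvStepA (acc : List Char × List Char) (c : Char) : List Char × List Char :=
  if PySem.Chars.isdigit c || c == 'x' || c == 'X' then (acc.1 ++ [c], acc.2)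
  else if PySem.Chars.isalpha c && pvAZ.contains (PySem.Chars.upperChar c) then
    -- char.isalpha() and char.upper() in 'ABC…Z' (upperChar is char-exact on ASCII)
    (acc.1, acc.2 ++ [PySem.Chars.upperChar c])
  else acc

def parse_richmond_pack_name (pack_name : String) : List (String × Option String) :=
  -- pack_name.strip().lstrip('|'): lstrip('|') drops leading '|' characters (exact)
  let pack_clean := (PySem.Chars.strip pack_name.toList).dropWhile (fun c => c == '|')
  -- pack_clean.split(' ', 1)
  let parts := PySem.Chars.splitOnMax pack_clean [' '] 1
  let code_part := parts.headD []          -- parts[0] if parts else "" (split never returns [])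
  let description := if 1 < parts.length then parts.getD 1 [] else []
  -- '.' in code_part / code_part.split('.', 1)
  let mm : List Char × List Char :=
    if PySem.Chars.isIn ['.'] code_part then
      let ps := PySem.Chars.splitOnMax code_part ['.'] 1
      let major_part := ps.headD []
      let minor_part := ps.getD 1 []
      if major_part = [] then
        let minor_digits := pvDigits minor_part
        if minor_digits ≠ [] then
          ((if 2 ≤ minor_digits.length then minor_digits.take 2 else minor_digits),
           (if 2 < minor_digits.length then minor_digits.drop 2 else []))
        else (major_part, minor_part)
      else (major_part, minor_part)
    else (code_part, [])
  let phase_major := pvDigits mm.1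
  let pe := if mm.2 ≠ [] then mm.2.foldl pvStepA ([], []) else ([], [])
  [("phase_major", some (String.ofList phase_major)),
   ("phase_minor", some (String.ofList pe.1)),
   ("elevations", some (String.ofList pe.2)),
   ("description", some (String.ofList description)),
   ("error", none)]

-- ===== PORT B =====
-- the machine state: st = 0 (major code) / 1 (minor code) / 2 (description)
structure pvSt where
  st : Nat
  major : List Char
  pm : List Char
  el : List Char
  desc : List Char
deriving Repr, DecidableEq

-- the body of B's 'for ch in s' loop
def pvStepB (σ : pvSt) (c : Char) : pvSt :=
  if σ.st == 2 then { σ with desc := σ.desc ++ [c] }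
  else if c == ' ' then { σ with st := 2 }
  else if σ.st == 0 then
    if c == '.' then { σ with st := 1 }
    else if PySem.Chars.isdigit c then { σ with major := σ.major ++ [c] }
    else σ
  else
    if PySem.Chars.isdigit c || c == 'x' || c == 'X' then { σ with pm := σ.pm ++ [c] }
    else if PySem.Chars.isalpha c then { σ with el := σ.el ++ [PySem.Chars.upperChar c] }
    else σ

def parse_richmond_pack_name_alt (pack_name : String) : List (String × Option String) :=
  -- pack_name.strip().lstrip('|') (as in A's port)
  let s := (PySem.Chars.strip pack_name.toList).dropWhile (fun c => c == '|')
  let σ := s.foldl pvStepB ⟨0, [], [], [], []⟩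
  -- the '.NN' leading-period fixup
  let r : List Char × List Char × List Char :=
    if PySem.Chars.startswith s ['.'] then
      let d := σ.pm.filter (fun c => PySem.Chars.isdigit c)
      if d ≠ [] then (d.take 2, d.drop 2, ([] : List Char)) else (σ.major, σ.pm, σ.el)
    else (σ.major, σ.pm, σ.el)
  [("phase_major", some (String.ofList r.1)),
   ("phase_minor", some (String.ofList r.2.1)),
   ("elevations", some (String.ofList r.2.2)),
   ("description", some (String.ofList σ.desc)),
   ("error", none)]

-- ===== PRECONDITION & SPEC =====
def Spec_parse_richmond_pack_name (pack_name : String) (out : List (String × Option String)) : Prop := out = parse_richmond_pack_name_alt pack_name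
instance (pack_name : String) (out : List (String × Option String)) : Decidable (Spec_parse_richmond_pack_name pack_name out) := by unfold Spec_parse_richmond_pack_name; infer_instance

-- ===== CLAIM (what is proved, stated in full; the proofs are below) =====
def Claim_equal_parse_richmond_pack_name : Prop := ∀ (pack_name : String), Dom_parse_richmond_pack_name pack_name → Spec_parse_richmond_pack_name pack_name (parse_richmond_pack_name pack_name)

-- ===== LEMMAS AND PROOFS =====

lemma pv_az_mem (u : Char) (h1 : 65 ≤ u.toNat) (h2 : u.toNat ≤ 90) : pvAZ.contains u = true := by
  have he : u = Char.ofNat u.toNat := (Char.ofNat_toNat u).symm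
  rw [he]
  interval_cases h : u.toNat <;> decide

lemma pv_upper_mem (c : Char) (h : PySem.Chars.isalpha c = true) :
    pvAZ.contains (PySem.Chars.upperChar c) = true := by
  simp only [PySem.Chars.isalpha, PySem.Chars.isupper, PySem.Chars.islower, Bool.or_eq_true,
    Bool.and_eq_true, decide_eq_true_eq] at h
  have hv : 65 ≤ c.toNat ∧ c.toNat ≤ 90 ∨ 97 ≤ c.toNat ∧ c.toNat ≤ 122 := by
    rcases h with ⟨h1, h2⟩ | ⟨h1, h2⟩
    · left; exact ⟨h1, h2⟩
    · right; exact ⟨h1, h2⟩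
  unfold PySem.Chars.upperChar PySem.Chars.islower
  rcases hv with ⟨h1, h2⟩ | ⟨h1, h2⟩
  · rw [if_neg]
    · exact pv_az_mem c h1 h2
    · simp only [Bool.and_eq_true, decide_eq_true_eq, not_and]
      intro hc
      exfalso
      have : 97 ≤ c.toNat := hc
      omega
  · rw [if_pos]
    · have hval : (c.toNat - 32).isValidChar := Or.inl (by omega)
      apply pv_az_mem <;> simp [Char.toNat_ofNat, hval] <;> omega
    · simp only [Bool.and_eq_true, decide_eq_true_eq]
      exact ⟨h1, h2⟩

def pvPmCond (c : Char) : Bool := PySem.Chars.isdigit c || c == 'x' || c == 'X'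
def pvPmOf (xs : List Char) : List Char := xs.filter pvPmCond
def pvElA (xs : List Char) : List Char :=
  (xs.filter (fun c => !pvPmCond c && (PySem.Chars.isalpha c && pvAZ.contains (PySem.Chars.upperChar c)))).map PySem.Chars.upperChar
def pvElB (xs : List Char) : List Char :=
  (xs.filter (fun c => !pvPmCond c && PySem.Chars.isalpha c)).map PySem.Chars.upperChar

lemma pvElA_eq_pvElB (xs : List Char) : pvElA xs = pvElB xs := by
  unfold pvElA pvElB
  congr 1
  apply List.filter_congr
  intro c _
  by_cases hp : pvPmCond c = true
  · simp [hp]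
  · by_cases ha : PySem.Chars.isalpha c = true
    · have hm : PySem.Chars.upperChar c ∈ pvAZ := by simpa using pv_upper_mem c ha
      simp [Bool.eq_false_iff.2 hp, ha, hm]
    · simp [Bool.eq_false_iff.2 ha]

lemma pvStepA_pm {a b : List Char} {c : Char} (h : pvPmCond c = true) :
    pvStepA (a, b) c = (a ++ [c], b) := by
  unfold pvStepA; rw [if_pos (by simpa [pvPmCond] using h)]

lemma pvStepA_el {a b : List Char} {c : Char} (h1 : pvPmCond c = false)
    (h2 : (PySem.Chars.isalpha c && pvAZ.contains (PySem.Chars.upperChar c)) = true) :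
    pvStepA (a, b) c = (a, b ++ [PySem.Chars.upperChar c]) := by
  unfold pvStepA
  rw [if_neg (by simpa [pvPmCond] using Bool.eq_false_iff.1 h1), if_pos (by simpa using h2)]

lemma pvStepA_skip {a b : List Char} {c : Char} (h1 : pvPmCond c = false)
    (h2 : (PySem.Chars.isalpha c && pvAZ.contains (PySem.Chars.upperChar c)) = false) :
    pvStepA (a, b) c = (a, b) := by
  unfold pvStepA
  rw [if_neg (by simpa [pvPmCond] using Bool.eq_false_iff.1 h1),
      if_neg (by simpa using Bool.eq_false_iff.1 h2)]

lemma pv_foldA (xs : List Char) (a b : List Char) :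
    xs.foldl pvStepA (a, b) = (a ++ pvPmOf xs, b ++ pvElA xs) := by
  induction xs generalizing a b with
  | nil => simp [pvPmOf, pvElA]
  | cons c t ih =>
    simp only [List.foldl_cons]
    by_cases h1 : pvPmCond c = true
    · rw [pvStepA_pm h1, ih]
      simp [pvPmOf, pvElA, List.filter_cons, h1]
    · by_cases h2 : (PySem.Chars.isalpha c && pvAZ.contains (PySem.Chars.upperChar c)) = true
      · rw [pvStepA_el (Bool.eq_false_iff.2 h1) h2, ih]
        simp only [pvPmOf, pvElA, List.filter_cons, Bool.eq_false_iff.2 h1]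
        rw [if_neg (by simp [Bool.eq_false_iff.2 h1]), if_pos (by simpa using h2)]
        simp
      · rw [pvStepA_skip (Bool.eq_false_iff.2 h1) (Bool.eq_false_iff.2 h2), ih]
        simp only [pvPmOf, pvElA, List.filter_cons, Bool.eq_false_iff.2 h1]
        rw [if_neg (by simp [Bool.eq_false_iff.2 h1]), if_neg (by simpa using Bool.eq_false_iff.1 (Bool.eq_false_iff.2 h2))]

lemma pv_foldB2 (xs : List Char) (σ : pvSt) (h : σ.st = 2) :
    xs.foldl pvStepB σ = { σ with desc := σ.desc ++ xs } := by
  induction xs generalizing σ with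
  | nil => simp
  | cons c t ih =>
    simp only [List.foldl_cons]
    rw [show pvStepB σ c = { σ with desc := σ.desc ++ [c] } by unfold pvStepB; rw [if_pos (by simp [h])]]
    rw [ih _ (by simp [h])]
    simp

lemma pv_foldB1 (xs : List Char) (σ : pvSt) (h : σ.st = 1) (hs : ' ' ∉ xs) :
    xs.foldl pvStepB σ = { σ with pm := σ.pm ++ pvPmOf xs, el := σ.el ++ pvElB xs } := by
  induction xs generalizing σ with
  | nil => simp [pvPmOf, pvElB]
  | cons c t ih =>
    have hc : c ≠ ' ' := fun he => hs (he ▸ List.mem_cons_self)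
    have ht : ' ' ∉ t := fun m => hs (List.mem_cons_of_mem _ m)
    simp only [List.foldl_cons]
    by_cases h1 : pvPmCond c = true
    · rw [show pvStepB σ c = { σ with pm := σ.pm ++ [c] } by
        unfold pvStepB
        rw [if_neg (by simp [h]), if_neg (by simp [hc]), if_neg (by simp [h]),
            if_pos (by simpa [pvPmCond] using h1)]]
      rw [ih _ (by simp [h]) ht]
      simp [pvPmOf, pvElB, List.filter_cons, h1]
    · by_cases h2 : PySem.Chars.isalpha c = true
      · rw [show pvStepB σ c = { σ with el := σ.el ++ [PySem.Chars.upperChar c] } by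
          unfold pvStepB
          rw [if_neg (by simp [h]), if_neg (by simp [hc]), if_neg (by simp [h]),
              if_neg (by simpa [pvPmCond] using Bool.eq_false_iff.1 (Bool.eq_false_iff.2 h1)),
              if_pos (by simp [h2])]]
        rw [ih _ (by simp [h]) ht]
        simp [pvPmOf, pvElB, List.filter_cons, Bool.eq_false_iff.2 h1, h2]
      · rw [show pvStepB σ c = σ by
          unfold pvStepB
          rw [if_neg (by simp [h]), if_neg (by simp [hc]), if_neg (by simp [h]),
              if_neg (by simpa [pvPmCond] using Bool.eq_false_iff.1 (Bool.eq_false_iff.2 h1)),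
              if_neg (by simp [h2])]]
        rw [ih _ h ht]
        simp [pvPmOf, pvElB, List.filter_cons, Bool.eq_false_iff.2 h1, Bool.eq_false_iff.2 h2]

lemma pv_foldB0 (xs : List Char) (σ : pvSt) (h : σ.st = 0) (hs : ' ' ∉ xs) :
    xs.foldl pvStepB σ =
      if '.' ∈ xs then
        { σ with st := 1, major := σ.major ++ pvDigits (xs.takeWhile (· ≠ '.')), pm := σ.pm ++ pvPmOf ((xs.dropWhile (· ≠ '.')).tail), el := σ.el ++ pvElB ((xs.dropWhile (· ≠ '.')).tail) }
      else { σ with major := σ.major ++ pvDigits xs } := by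
  induction xs generalizing σ with
  | nil => simp [pvDigits]
  | cons c t ih =>
    have hc : c ≠ ' ' := fun he => hs (he ▸ List.mem_cons_self)
    have ht : ' ' ∉ t := fun m => hs (List.mem_cons_of_mem _ m)
    simp only [List.foldl_cons]
    by_cases hdot : c = '.'
    · subst hdot
      rw [show pvStepB σ '.' = { σ with st := 1 } by
        unfold pvStepB
        rw [if_neg (by simp [h]), if_neg (by simp), if_pos (by simp [h]), if_pos (by simp)]]
      rw [pv_foldB1 t _ (by simp) ht]
      rw [if_pos (List.mem_cons_self)]
      simp [List.takeWhile, List.dropWhile, pvDigits]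
    · have hstep : pvStepB σ c =
          (if PySem.Chars.isdigit c then { σ with major := σ.major ++ [c] } else σ) := by
        unfold pvStepB
        rw [if_neg (by simp [h]), if_neg (by simp [hc]), if_pos (by simp [h]),
            if_neg (by simp [hdot])]
      have htw : (c :: t).takeWhile (· ≠ '.') = c :: t.takeWhile (· ≠ '.') := by
        simp [List.takeWhile, hdot]
      have hdw : (c :: t).dropWhile (· ≠ '.') = t.dropWhile (· ≠ '.') := by
        simp [List.dropWhile, hdot]
      have hne : ('.' : Char) ≠ c := fun he => hdot he.symm
      by_cases hd : PySem.Chars.isdigit c = true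
      · rw [hstep, if_pos hd, ih _ (by simp [h]) ht]
        by_cases hm : '.' ∈ t
        · rw [if_pos hm, if_pos (List.mem_cons.mpr (Or.inr hm))]
          simp [pvDigits, List.filter_cons, hd, List.takeWhile_cons, List.dropWhile_cons, hdot]
        · rw [if_neg hm, if_neg (by simp [List.mem_cons, hm, hne])]
          simp [pvDigits, List.filter_cons, hd]
      · rw [hstep, if_neg hd, ih _ h ht]
        by_cases hm : '.' ∈ t
        · rw [if_pos hm, if_pos (List.mem_cons.mpr (Or.inr hm))]
          simp [pvDigits, List.filter_cons, Bool.eq_false_iff.2 hd, List.takeWhile_cons, List.dropWhile_cons, hdot]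
        · rw [if_neg hm, if_neg (by simp [List.mem_cons, hm, hne])]
          simp [pvDigits, List.filter_cons, Bool.eq_false_iff.2 hd]

lemma pv_go_zero' (s : Char) (fuel : Nat) (l cur : List Char) (acc : List (List Char)) :
    PySem.Chars.splitOnMax.go [s] fuel 0 l cur acc = ((cur.reverse ++ l) :: acc).reverse := by
  cases fuel with
  | zero => rw [PySem.Chars.splitOnMax.go]
  | succ n =>
    cases l with
    | nil => rw [PySem.Chars.splitOnMax.go]; simp; omega
    | cons c rest => rw [PySem.Chars.splitOnMax.go]; simp

lemma pv_go_one (s : Char) : ∀ (fuel : Nat) (l cur : List Char) (acc : List (List Char)),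
    l.length < fuel →
    PySem.Chars.splitOnMax.go [s] fuel 1 l cur acc =
      if s ∈ l then acc.reverse ++ [cur.reverse ++ l.takeWhile (· ≠ s), (l.dropWhile (· ≠ s)).tail]
      else acc.reverse ++ [cur.reverse ++ l] := by
  intro fuel
  induction fuel with
  | zero => intro l cur acc h; omega
  | succ n ih =>
    intro l cur acc h
    cases l with
    | nil => rw [PySem.Chars.splitOnMax.go]; simp; omega
    | cons c rest =>
      rw [PySem.Chars.splitOnMax.go]
      simp only [Nat.one_ne_zero, if_false]
      by_cases hc : c = s
      · subst hc
        rw [if_pos (by simp [List.isPrefixOf])]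
        norm_num
        rw [pv_go_zero' c n rest [] (cur.reverse :: acc)]
        simp
      · rw [if_neg (by simp [List.isPrefixOf, Ne.symm hc])]
        simp only [List.length_cons] at h
        rw [ih rest (c :: cur) acc (by omega)]
        by_cases hm : s ∈ rest
        · rw [if_pos hm, if_pos (List.mem_cons.mpr (Or.inr hm))]
          simp [List.takeWhile_cons, List.dropWhile_cons, hc]
        · rw [if_neg hm, if_neg (by simp [List.mem_cons, hm, Ne.symm hc])]
          simp

lemma pv_splitOnMax_one (sep : Char) (cs : List Char) :
    PySem.Chars.splitOnMax cs [sep] 1 =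
      if sep ∈ cs then [cs.takeWhile (· ≠ sep), (cs.dropWhile (· ≠ sep)).tail]
      else [cs] := by
  unfold PySem.Chars.splitOnMax
  rw [if_neg (by omega)]
  norm_num
  rw [pv_go_one sep (cs.length + 1) cs [] [] (by omega)]
  split <;> simp

lemma pv_pe (m : List Char) :
    (if m ≠ [] then m.foldl pvStepA ([], []) else ([], [])) = (pvPmOf m, pvElA m) := by
  by_cases h : m = []
  · subst h; simp [pvPmOf, pvElA]
  · rw [if_pos h, pv_foldA]; simp

lemma pv_isIn_singleton (c : Char) (l : List Char) :
    PySem.Chars.isIn [c] l = l.contains c := by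
  by_cases h : c ∈ l
  · rw [List.contains_eq_mem]
    simp only [h, decide_true]
    rw [PySem.Chars.isIn_iff_infix]
    exact (List.singleton_infix_iff c l).mpr h
  · rw [List.contains_eq_mem]
    simp only [h, decide_false]
    rw [PySem.Chars.isIn_eq_false_iff]
    exact fun hi => h ((List.singleton_infix_iff c l).mp hi)

lemma pv_startswith_singleton (c : Char) (l : List Char) :
    PySem.Chars.startswith l [c] = true ↔ l.head? = some c := by
  rw [PySem.Chars.startswith_iff]
  cases l with
  | nil => simp
  | cons x t =>
    constructor
    · intro hp
      rcases hp with ⟨s, hs⟩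
      cases hs
      rfl
    · intro hh
      simp only [List.head?_cons, Option.some.injEq] at hh
      subst hh
      exact ⟨t, rfl⟩

lemma pv_filter_pm (xs : List Char) :
    (pvPmOf xs).filter (fun c => PySem.Chars.isdigit c) = pvDigits xs := by
  unfold pvPmOf pvDigits
  rw [List.filter_filter]
  apply List.filter_congr
  intro c _
  by_cases h : PySem.Chars.isdigit c = true
  · simp [h, pvPmCond]
  · simp [Bool.eq_false_iff.2 h]

lemma pv_code (code : List Char) (hnc : ' ' ∉ code) :
    (let mm : List Char × List Char :=
       if '.' ∈ code then
         let bef := code.takeWhile (· ≠ '.')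
         let aft := (code.dropWhile (· ≠ '.')).tail
         if bef = [] then
           let md := pvDigits aft
           if md ≠ [] then
             ((if 2 ≤ md.length then md.take 2 else md), (if 2 < md.length then md.drop 2 else []))
           else (bef, aft)
         else (bef, aft)
       else (code, [])
     (pvDigits mm.1, pvPmOf mm.2, pvElA mm.2)) =
    (let σ := code.foldl pvStepB ⟨0, [], [], [], []⟩
     if code.head? = some '.' then
       let d := σ.pm.filter (fun c => PySem.Chars.isdigit c)
       if d ≠ [] then (d.take 2, d.drop 2, ([] : List Char)) else (σ.major, σ.pm, σ.el)
     else (σ.major, σ.pm, σ.el)) := by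
  rw [pv_foldB0 code _ rfl hnc]
  by_cases hdot : '.' ∈ code
  · simp only [hdot, if_pos]
    by_cases hh : code.head? = some '.'
    · obtain ⟨t, rfl⟩ : ∃ t, code = '.' :: t := by
        cases code with
        | nil => simp at hh
        | cons x t => simp only [List.head?_cons, Option.some.injEq] at hh; exact ⟨t, by rw [hh]⟩
      have hbef : ('.' :: t).takeWhile (· ≠ '.') = [] := by simp [List.takeWhile_cons]
      have haft : (('.' :: t).dropWhile (· ≠ '.')).tail = t := by simp [List.dropWhile_cons]
      rw [hbef, haft]
      simp only [if_pos rfl, if_pos (rfl : some '.' = some '.'), List.nil_append, if_true]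
      rw [pv_filter_pm]
      by_cases hmd : pvDigits t = []
      · simp [hmd, pvElA_eq_pvElB]
      · rw [if_pos hmd, if_pos hmd]
        have hall : ∀ c ∈ pvDigits t, PySem.Chars.isdigit c = true := by
          intro c hc; exact List.of_mem_filter hc
        have h1 : (if 2 ≤ (pvDigits t).length then (pvDigits t).take 2 else pvDigits t) =
            (pvDigits t).take 2 := by
          split
          · rfl
          · rw [List.take_of_length_le (by omega)]
        have h2 : (if 2 < (pvDigits t).length then (pvDigits t).drop 2 else []) =
            (pvDigits t).drop 2 := by
          split
          · rfl
          · rw [List.drop_eq_nil_of_le (by omega)]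
        rw [h1, h2]
        have hd1 : pvDigits ((pvDigits t).take 2) = (pvDigits t).take 2 :=
          List.filter_eq_self.mpr (fun c hc => hall c (List.take_subset _ _ hc))
        have hd2 : pvPmOf ((pvDigits t).drop 2) = (pvDigits t).drop 2 :=
          List.filter_eq_self.mpr (fun c hc => by
            simp [pvPmCond, hall c (List.drop_subset _ _ hc)])
        have hd3 : pvElA ((pvDigits t).drop 2) = [] := by
          unfold pvElA
          rw [List.filter_eq_nil_iff.mpr, List.map_nil]
          intro c hc
          simp [pvPmCond, hall c (List.drop_subset _ _ hc)]
        rw [hd1, hd2, hd3]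
        simp
    · have hbef : code.takeWhile (· ≠ '.') ≠ [] := by
        cases code with
        | nil => simp at hdot
        | cons x t =>
          have hx : x ≠ '.' := fun he => hh (by simp [he])
          simp [List.takeWhile_cons, hx]
      rw [if_neg hbef, if_neg hh]
      simp [pvElA_eq_pvElB]
  · simp only [hdot, if_neg, if_false]
    have hh : ¬ code.head? = some '.' := by
      intro h
      cases code with
      | nil => simp at h
      | cons x t =>
        simp only [List.head?_cons, Option.some.injEq] at h
        exact hdot (h ▸ List.mem_cons_self)
    rw [if_neg hh]
    simp [pvPmOf, pvElA]


lemma pv_takeWhile_app (p : Char → Bool) (l r : List Char) (x : Char)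
    (h : ∀ y ∈ l, p y = true) (hx : p x = false) :
    (l ++ x :: r).takeWhile p = l := by
  induction l with
  | nil => simp [List.takeWhile_cons, hx]
  | cons a t ih =>
    simp only [List.cons_append, List.takeWhile_cons, h a List.mem_cons_self]
    simp [ih (fun y hy => h y (List.mem_cons_of_mem _ hy))]

lemma pv_dropWhile_app (p : Char → Bool) (l r : List Char) (x : Char)
    (h : ∀ y ∈ l, p y = true) (hx : p x = false) :
    (l ++ x :: r).dropWhile p = x :: r := by
  induction l with
  | nil => simp [List.dropWhile_cons, hx]
  | cons a t ih =>
    simp only [List.cons_append, List.dropWhile_cons, h a List.mem_cons_self]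
    exact ih (fun y hy => h y (List.mem_cons_of_mem _ hy))

lemma pv_code' (code : List Char) (hnc : ' ' ∉ code) :
    (let mm : List Char × List Char :=
       if PySem.Chars.isIn ['.'] code then
         let ps := PySem.Chars.splitOnMax code ['.'] 1
         let major_part := ps.headD []
         let minor_part := ps.getD 1 []
         if major_part = [] then
           let minor_digits := pvDigits minor_part
           if minor_digits ≠ [] then
             ((if 2 ≤ minor_digits.length then minor_digits.take 2 else minor_digits),
              (if 2 < minor_digits.length then minor_digits.drop 2 else []))
           else (major_part, minor_part)
         else (major_part, minor_part)
       else (code, [])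
     (pvDigits mm.1, pvPmOf mm.2, pvElA mm.2)) =
    (let σ := code.foldl pvStepB ⟨0, [], [], [], []⟩
     if code.head? = some '.' then
       let d := σ.pm.filter (fun c => PySem.Chars.isdigit c)
       if d ≠ [] then (d.take 2, d.drop 2, ([] : List Char)) else (σ.major, σ.pm, σ.el)
     else (σ.major, σ.pm, σ.el)) := by
  have h := pv_code code hnc
  simp only [pv_isIn_singleton, pv_splitOnMax_one, List.contains_eq_mem] at *
  by_cases hdot : '.' ∈ code
  · simp only [hdot, decide_true, if_true, if_pos] at h ⊢
    simpa using h
  · simp only [hdot, decide_false, if_false, if_neg] at h ⊢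
    exact h

lemma pv_foldB_split (code rest : List Char) (hnc : ' ' ∉ code) :
    (code ++ ' ' :: rest).foldl pvStepB ⟨0, [], [], [], []⟩ =
      (let σ := code.foldl pvStepB ⟨0, [], [], [], []⟩
       { σ with st := 2, desc := rest }) := by
  rw [List.foldl_append, List.foldl_cons]
  rw [pv_foldB0 code _ rfl hnc]
  have hstep1 : ∀ σ : pvSt, σ.st = 1 → pvStepB σ ' ' = { σ with st := 2 } := fun σ h => by
    unfold pvStepB; rw [if_neg (by simp [h]), if_pos (by simp)]
  have hstep0 : ∀ σ : pvSt, σ.st = 0 → pvStepB σ ' ' = { σ with st := 2 } := fun σ h => by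
    unfold pvStepB; rw [if_neg (by simp [h]), if_pos (by simp)]
  by_cases hdot : '.' ∈ code
  · rw [if_pos hdot, hstep1 _ rfl, pv_foldB2 _ _ rfl]
    simp [pv_foldB0 code ⟨0, [], [], [], []⟩ rfl hnc, hdot]
  · rw [if_neg hdot, hstep0 _ rfl, pv_foldB2 _ _ rfl]
    simp [pv_foldB0 code ⟨0, [], [], [], []⟩ rfl hnc, hdot]

lemma pv_head?_append (code rest : List Char) :
    ((code ++ ' ' :: rest).head? = some '.') = (code.head? = some '.') := by
  cases code with
  | nil => simp
  | cons x t => simp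

lemma pv_split_exists (cs : List Char) (hsp : ' ' ∈ cs) :
    ∃ code rest, cs = code ++ ' ' :: rest ∧ ' ' ∉ code := by
  refine ⟨cs.takeWhile (· ≠ ' '), (cs.dropWhile (· ≠ ' ')).tail, ?_, ?_⟩
  · have hne : cs.dropWhile (fun x => decide (x ≠ ' ')) ≠ [] := by
      intro hnil
      have := List.dropWhile_eq_nil_iff.mp hnil ' ' hsp
      simp at this
    obtain ⟨a, t, he⟩ := List.exists_cons_of_ne_nil hne
    have ha : a = ' ' := by
      have h2 := List.head_dropWhile_not (p := fun x => decide (x ≠ ' ')) (l := cs) hne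
      simp only [he, List.head_cons, decide_eq_true_eq] at h2
      simpa using h2
    conv_lhs => rw [← List.takeWhile_append_dropWhile (p := fun x => decide (x ≠ ' ')) (l := cs)]
    congr 1
    rw [he]
    simp [ha]
  · intro hm
    have := List.mem_takeWhile_imp hm
    simp at this

def pvMM (code : List Char) : List Char × List Char :=
  if PySem.Chars.isIn ['.'] code = true then
    if (PySem.Chars.splitOnMax code ['.'] 1).headD [] = [] then
      if pvDigits ((PySem.Chars.splitOnMax code ['.'] 1).getD 1 []) ≠ [] then
        (if 2 ≤ (pvDigits ((PySem.Chars.splitOnMax code ['.'] 1).getD 1 [])).length then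
            List.take 2 (pvDigits ((PySem.Chars.splitOnMax code ['.'] 1).getD 1 []))
          else pvDigits ((PySem.Chars.splitOnMax code ['.'] 1).getD 1 []),
          if 2 < (pvDigits ((PySem.Chars.splitOnMax code ['.'] 1).getD 1 [])).length then
            List.drop 2 (pvDigits ((PySem.Chars.splitOnMax code ['.'] 1).getD 1 []))
          else [])
      else ((PySem.Chars.splitOnMax code ['.'] 1).headD [], (PySem.Chars.splitOnMax code ['.'] 1).getD 1 [])
    else ((PySem.Chars.splitOnMax code ['.'] 1).headD [], (PySem.Chars.splitOnMax code ['.'] 1).getD 1 [])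
  else (code, [])

def pvBR (F : pvSt) (hd : Option Char) : List Char × List Char × List Char :=
  if hd = some '.' then
    if List.filter (fun c => PySem.Chars.isdigit c) F.pm ≠ [] then
      (List.take 2 (List.filter (fun c => PySem.Chars.isdigit c) F.pm),
       List.drop 2 (List.filter (fun c => PySem.Chars.isdigit c) F.pm), [])
    else (F.major, F.pm, F.el)
  else (F.major, F.pm, F.el)

lemma pv_code'' (code : List Char) (hnc : ' ' ∉ code) :
    (pvDigits (pvMM code).1, pvPmOf (pvMM code).2, pvElA (pvMM code).2) =
      pvBR (code.foldl pvStepB ⟨0, [], [], [], []⟩) code.head? := by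
  have h := pv_code' code hnc
  unfold pvMM pvBR
  exact h


def pvCoreA (cs : List Char) : List Char × List Char × List Char × List Char :=
  let parts := PySem.Chars.splitOnMax cs [' '] 1
  let code_part := parts.headD []
  let description := if 1 < parts.length then parts.getD 1 [] else []
  let mm : List Char × List Char :=
    if PySem.Chars.isIn ['.'] code_part then
      let ps := PySem.Chars.splitOnMax code_part ['.'] 1
      let major_part := ps.headD []
      let minor_part := ps.getD 1 []
      if major_part = [] then
        let minor_digits := pvDigits minor_part
        if minor_digits ≠ [] then
          ((if 2 ≤ minor_digits.length then minor_digits.take 2 else minor_digits),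
           (if 2 < minor_digits.length then minor_digits.drop 2 else []))
        else (major_part, minor_part)
      else (major_part, minor_part)
    else (code_part, [])
  let phase_major := pvDigits mm.1
  let pe := if mm.2 ≠ [] then mm.2.foldl pvStepA ([], []) else ([], [])
  (phase_major, pe.1, pe.2, description)

def pvCoreB (cs : List Char) : List Char × List Char × List Char × List Char :=
  let σ := cs.foldl pvStepB ⟨0, [], [], [], []⟩
  let r : List Char × List Char × List Char :=
    if PySem.Chars.startswith cs ['.'] then
      let d := σ.pm.filter (fun c => PySem.Chars.isdigit c)
      if d ≠ [] then (d.take 2, d.drop 2, ([] : List Char)) else (σ.major, σ.pm, σ.el)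
    else (σ.major, σ.pm, σ.el)
  (r.1, r.2.1, r.2.2, σ.desc)

def pvOut (t : List Char × List Char × List Char × List Char) : List (String × Option String) :=
  [("phase_major", some (String.ofList t.1)),
   ("phase_minor", some (String.ofList t.2.1)),
   ("elevations", some (String.ofList t.2.2.1)),
   ("description", some (String.ofList t.2.2.2)),
   ("error", none)]

lemma pvA_eq (p : String) :
    parse_richmond_pack_name p = pvOut (pvCoreA ((PySem.Chars.strip p.toList).dropWhile (fun c => c == '|'))) := rfl

lemma pvB_eq (p : String) :
    parse_richmond_pack_name_alt p = pvOut (pvCoreB ((PySem.Chars.strip p.toList).dropWhile (fun c => c == '|'))) := rfl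

lemma pv_core (cs : List Char) : pvCoreA cs = pvCoreB cs := by
  unfold pvCoreA pvCoreB
  by_cases hsp : ' ' ∈ cs
  · obtain ⟨code, rest, rfl, hnc⟩ := pv_split_exists cs hsp
    have hcodep : ∀ y ∈ code, (fun x => decide (x ≠ ' ')) y = true := by
      intro y hy
      simp only [decide_eq_true_eq]
      intro he; exact hnc (he ▸ hy)
    rw [pv_splitOnMax_one, if_pos hsp]
    rw [pv_takeWhile_app _ _ _ _ hcodep (by simp)]
    rw [pv_dropWhile_app _ _ _ _ hcodep (by simp)]
    rw [pv_foldB_split code rest hnc]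
    have h := pv_code'' code hnc
    simp only [List.headD_cons, List.getD_cons_succ, List.getD_cons_zero, List.length_cons,
      List.tail_cons]
    rw [pv_pe]
    unfold pvMM pvBR at h
    dsimp only
    by_cases hx : code.head? = some '.'
    · rw [if_pos hx] at h
      rw [if_pos ((pv_startswith_singleton '.' _).mpr (by rw [pv_head?_append]; exact hx))]
      simp only [Prod.mk.injEq]
      exact ⟨congrArg (fun t => t.1) h, congrArg (fun t => t.2.1) h,
        congrArg (fun t => t.2.2) h, by norm_num⟩
    · rw [if_neg hx] at h
      rw [if_neg (fun hc => hx ((pv_head?_append code rest) ▸ (pv_startswith_singleton '.' _).mp hc))]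
      simp only [Prod.mk.injEq]
      exact ⟨congrArg (fun t => t.1) h, congrArg (fun t => t.2.1) h,
        congrArg (fun t => t.2.2) h, by norm_num⟩
  · rw [pv_splitOnMax_one, if_neg hsp]
    have h := pv_code'' cs hsp
    simp only [List.headD_cons, List.length_cons, List.length_nil]
    rw [pv_pe]
    unfold pvMM pvBR at h
    dsimp only
    by_cases hx : cs.head? = some '.'
    · rw [if_pos hx] at h
      rw [if_pos ((pv_startswith_singleton '.' _).mpr hx)]
      simp only [Prod.mk.injEq]
      exact ⟨congrArg (fun t => t.1) h, congrArg (fun t => t.2.1) h,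
        congrArg (fun t => t.2.2) h, by rw [pv_foldB0 cs ⟨0, [], [], [], []⟩ rfl hsp]; by_cases hd : '.' ∈ cs <;> simp [hd]⟩
    · rw [if_neg hx] at h
      rw [if_neg (fun hc => hx ((pv_startswith_singleton '.' _).mp hc))]
      simp only [Prod.mk.injEq]
      exact ⟨congrArg (fun t => t.1) h, congrArg (fun t => t.2.1) h,
        congrArg (fun t => t.2.2) h, by rw [pv_foldB0 cs ⟨0, [], [], [], []⟩ rfl hsp]; by_cases hd : '.' ∈ cs <;> simp [hd]⟩

-- ===== VERDICT (by name: the statement is the Claim_ definition above) =====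
theorem parse_richmond_pack_name_spec : Claim_equal_parse_richmond_pack_name := by
  intro pack_name _
  unfold Spec_parse_richmond_pack_name
  rw [pvA_eq, pvB_eq, pv_core]
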